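-- pv_equiv track=rewrite | github.com/aryanj10/dashboard | common_util.py | preprocess_comparison_data
-- ===== SOURCE A (Python) =====
-- def preprocess_comparison_data(period_totals, trailing_periods=12):
--     """
--     Precomputes current and previous period values for all line items.
--     Returns a dictionary: {line_item: (periods, current_values, prev_values)}
--     """
--     comparison_data = {}
--     all_line_items = set()
--
--     # Gather all possible line items
--     for period_data in period_totals.values():
--         all_line_items.update(period_data.keys())
--
--     for line_item in all_line_items:
--         periods = []
--         current_values = []
--         prev_values = []
--
--         for period in period_totals:
--             if line_item not in period_totals[period]:
--                 continue
--
--             current_value = period_totals[period][line_item]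
--             current_values.append(current_value)
--             periods.append(period)
--
--             # Get previous period
--             prev_period = None
--             if '-' in period:
--                 p_parts = period.split('-')
--                 if len(p_parts) == 2 and p_parts[1].isdigit():
--                     prev_period = f"{p_parts[0]}-{int(p_parts[1]) - 1:02d}"
--
--             if prev_period and prev_period in period_totals and line_item in period_totals[prev_period]:
--                 prev_value = period_totals[prev_period][line_item]
--             else:
--                 prev_value = 0
--
--             prev_values.append(prev_value)
--
--         # Store last N periods only
--         comparison_data[line_item] = (
--             periods[-trailing_periods:],
--             current_values[-trailing_periods:],
--             prev_values[-trailing_periods:]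
--         )
--
--     return comparison_data
-- ===== SOURCE B (Python) =====
-- def preprocess_comparison_data(period_totals, trailing_periods=12):
--     """Single pass over periods; appends into per-line-item lists (prev period parsed once per period)."""
--     acc = {}
--     for period, period_data in period_totals.items():
--         prev_period = None
--         if '-' in period:
--             p_parts = period.split('-')
--             if len(p_parts) == 2 and p_parts[1].isdigit():
--                 prev_period = f"{p_parts[0]}-{int(p_parts[1]) - 1:02d}"
--         prev_data = period_totals.get(prev_period, {}) if prev_period is not None else {}
--         for line_item, value in period_data.items():
--             periods, currents, prevs = acc.setdefault(line_item, ([], [], []))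
--             periods.append(period)
--             currents.append(value)
--             prevs.append(prev_data.get(line_item, 0))
--     return {
--         li: (p[-trailing_periods:], c[-trailing_periods:], v[-trailing_periods:])
--         for li, (p, c, v) in acc.items()
--     }
-- ===== Notes on version B (the rewrite author's own statement) =====
-- stated objective: faster
-- what changed: B replaces A's per-line-item rescans of all periods (gather set of items, then for each item loop over every period) by one pass over the periods that parses each period's previous-period key once and appends into per-item lists kept in a dict, trimming at the end.
import Mathlib
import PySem

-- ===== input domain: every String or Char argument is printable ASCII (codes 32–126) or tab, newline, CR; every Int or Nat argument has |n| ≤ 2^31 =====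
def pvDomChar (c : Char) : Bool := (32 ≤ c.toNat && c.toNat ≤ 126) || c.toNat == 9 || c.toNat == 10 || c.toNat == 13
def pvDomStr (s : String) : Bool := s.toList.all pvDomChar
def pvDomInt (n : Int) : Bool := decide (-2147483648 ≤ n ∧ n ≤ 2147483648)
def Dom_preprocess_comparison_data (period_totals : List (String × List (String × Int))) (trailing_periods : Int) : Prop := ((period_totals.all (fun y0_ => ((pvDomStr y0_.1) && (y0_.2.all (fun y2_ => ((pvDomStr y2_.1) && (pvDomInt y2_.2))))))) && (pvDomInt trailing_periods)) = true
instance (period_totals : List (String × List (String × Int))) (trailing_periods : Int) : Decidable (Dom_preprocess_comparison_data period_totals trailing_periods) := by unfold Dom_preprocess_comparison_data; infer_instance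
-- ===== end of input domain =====

-- B replaces A's per-line-item rescans of all periods by one pass over the periods,
-- appending into per-item lists kept in a dict (objective: faster, O(N) vs O(L*P)).


-- ===== PORT A =====
-- shared helper: the prev_period computation ('-' in period; split; len == 2 and parts[1].isdigit();
-- f"{parts[0]}-{int(parts[1]) - 1:02d}") — identical inline code in both Pythons, one helper here
def pvPrevPeriod (period : String) : Option String :=
  if PySem.Str.isIn "-" period then
    let p_parts := (PySem.Str.split? period "-").getD []   -- sep "-" ≠ "": split? is always some
    if p_parts.length == 2 && PySem.Str.strIsdigit (p_parts.getD 1 "") then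
      match PySem.Int.ofStr? (p_parts.getD 1 "") with      -- isdigit guarantees some
      | some n => some (PySem.Str.join "" [p_parts.getD 0 "", "-", PySem.Str.zfill (PySem.Int.toStr (n - 1)) 2])
      | none => none
    else none
  else none

-- A: 'prev_value = period_totals[prev_period][line_item] if … else 0'
def pvPrevValA (d : PySem.Dict String (List (String × Int))) (period li : String) : Int :=
  match pvPrevPeriod period with
  | some pp =>
    match PySem.Dict.get? d pp with
    | some ppd => PySem.Dict.getD (PySem.Dict.mk ppd) li 0
    | none => 0
  | none => 0

-- A's inner loop body: 'for period in period_totals: if line_item not in …: continue; append …'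
def pvRowStepA (d : PySem.Dict String (List (String × Int))) (li : String)
    (acc : List String × List Int × List Int) (period : String) : List String × List Int × List Int :=
  match PySem.Dict.get? d period with
  | none => acc                                            -- unreachable: period ∈ d.keys
  | some pd =>
    match PySem.Dict.get? (PySem.Dict.mk pd) li with
    | none => acc                                          -- 'continue'
    | some cv => (acc.1 ++ [period], acc.2.1 ++ [cv], acc.2.2 ++ [pvPrevValA d period li])

def preprocess_comparison_data (period_totals : List (String × List (String × Int))) (trailing_periods : Int) : List (String × List String × List Int × List Int) :=
  let d := PySem.Dict.mk period_totals
  let all_line_items : PySem.Set String :=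
    (PySem.Dict.values d).foldl (fun s pd => PySem.Set.update s (pd.map (·.1))) []
  all_line_items.foldl (fun out li =>
    let r := (PySem.Dict.keys d).foldl (pvRowStepA d li) ([], [], [])
    out ++ [(li, PySem.List.slice r.1 (some (-trailing_periods)) none,
                 PySem.List.slice r.2.1 (some (-trailing_periods)) none,
                 PySem.List.slice r.2.2 (some (-trailing_periods)) none)]) []

-- ===== PORT B =====
-- B: 'prev_data = period_totals.get(prev_period, {}) if prev_period is not None else {}'
def pvPrevDataB (d : PySem.Dict String (List (String × Int))) (period : String) : PySem.Dict String Int :=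
  match pvPrevPeriod period with
  | some pp => PySem.Dict.mk (PySem.Dict.getD d pp [])
  | none => PySem.Dict.mk []

-- B's inner loop body: setdefault triple, append period / value / prev_data.get(line_item, 0)
def pvStepB (d : PySem.Dict String (List (String × Int))) (period : String)
    (acc : PySem.Dict String (List String × List Int × List Int)) (kv : String × Int) :
    PySem.Dict String (List String × List Int × List Int) :=
  let t := PySem.Dict.getD acc kv.1 ([], [], [])
  PySem.Dict.insert acc kv.1
    (t.1 ++ [period], t.2.1 ++ [kv.2], t.2.2 ++ [PySem.Dict.getD (pvPrevDataB d period) kv.1 0])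

def preprocess_comparison_data_alt (period_totals : List (String × List (String × Int))) (trailing_periods : Int) : List (String × List String × List Int × List Int) :=
  let d := PySem.Dict.mk period_totals
  let acc := period_totals.foldl (fun acc e => e.2.foldl (pvStepB d e.1) acc) (PySem.Dict.mk [])
  acc.items.map (fun p =>
    (p.1, PySem.List.slice p.2.1 (some (-trailing_periods)) none,
          PySem.List.slice p.2.2.1 (some (-trailing_periods)) none,
          PySem.List.slice p.2.2.2 (some (-trailing_periods)) none))

-- ===== PRECONDITION & SPEC =====
-- Pre_ excludes association lists with duplicate keys (outer periods or inner line items): those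
-- represent no Python dict (A's and B's inputs are dicts, whose keys are necessarily unique).
def Pre_preprocess_comparison_data (period_totals : List (String × List (String × Int))) (trailing_periods : Int) : Prop :=
  (period_totals.map (·.1)).Nodup ∧ ∀ e ∈ period_totals, (e.2.map (·.1)).Nodup
instance (period_totals : List (String × List (String × Int))) (trailing_periods : Int) : Decidable (Pre_preprocess_comparison_data period_totals trailing_periods) := by unfold Pre_preprocess_comparison_data; infer_instance

def pvWitness_preprocess_comparison_data : (List (String × List (String × Int))) × Int :=
  ([("2023-01", [("rev", 3)]), ("2023-02", [("rev", 5), ("cost", 2)])], 12)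

def Spec_preprocess_comparison_data (period_totals : List (String × List (String × Int))) (trailing_periods : Int) (out : List (String × List String × List Int × List Int)) : Prop := out = preprocess_comparison_data_alt period_totals trailing_periods
instance (period_totals : List (String × List (String × Int))) (trailing_periods : Int) (out : List (String × List String × List Int × List Int)) : Decidable (Spec_preprocess_comparison_data period_totals trailing_periods out) := by unfold Spec_preprocess_comparison_data; infer_instance

-- ===== CLAIM (what is proved, stated in full; the proofs are below) =====
def Claim_equal_preprocess_comparison_data : Prop := ∀ (period_totals : List (String × List (String × Int))) (trailing_periods : Int), Dom_preprocess_comparison_data period_totals trailing_periods → Pre_preprocess_comparison_data period_totals trailing_periods → Spec_preprocess_comparison_data period_totals trailing_periods (preprocess_comparison_data period_totals trailing_periods)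

-- ===== LEMMAS AND PROOFS =====

-- proof-only: A's inner loop body re-expressed on the (period, data) entry itself
def pvRowEntry (d : PySem.Dict String (List (String × Int))) (li : String)
    (acc : List String × List Int × List Int) (e : String × List (String × Int)) : List String × List Int × List Int :=
  match PySem.Dict.get? (PySem.Dict.mk e.2) li with
  | none => acc
  | some cv => (acc.1 ++ [e.1], acc.2.1 ++ [cv], acc.2.2 ++ [pvPrevValA d e.1 li])

-- the two prev-value computations agree
theorem pvPrev_eq (d : PySem.Dict String (List (String × Int))) (period li : String) :
    PySem.Dict.getD (pvPrevDataB d period) li 0 = pvPrevValA d period li := by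
  unfold pvPrevDataB pvPrevValA
  cases hp : pvPrevPeriod period with
  | none => simp [PySem.Dict.getD, PySem.Dict.get?]
  | some pp =>
    simp only
    cases hg : PySem.Dict.get? d pp with
    | some ppd => rw [PySem.Dict.getD_eq_get?_getD d, hg]; simp
    | none =>
      rw [PySem.Dict.getD_eq_get?_getD d, hg]
      simp [PySem.Dict.getD, PySem.Dict.get?]

-- A's loop over keys with lookups = loop over the entries (outer keys Nodup)
theorem pvRowA_entries (pt : List (String × List (String × Int))) (li : String)
    (hnd : (pt.map (·.1)).Nodup) :
    ((PySem.Dict.mk pt).keys).foldl (pvRowStepA (PySem.Dict.mk pt) li) ([], [], []) =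
      pt.foldl (pvRowEntry (PySem.Dict.mk pt) li) ([], [], []) := by
  rw [PySem.Dict.keys_mk, List.foldl_map]
  apply PySem.List.foldl_congr_mem
  intro acc e he
  have hget : (PySem.Dict.mk pt).get? e.1 = some e.2 := by
    apply PySem.Dict.get?_of_mem_items
    · show (e.1, e.2) ∈ pt; simpa using he
    · rw [PySem.Dict.keys_mk]; exact hnd
  unfold pvRowStepA pvRowEntry
  rw [hget]

-- B's inner fold leaves keys not in kvs untouched
theorem pvStepB_getD_not_mem (d : PySem.Dict String (List (String × Int))) (period li : String)
    (kvs : List (String × Int)) (D : PySem.Dict String (List String × List Int × List Int))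
    (h : li ∉ kvs.map (·.1)) :
    (kvs.foldl (pvStepB d period) D).getD li ([], [], []) = D.getD li ([], [], []) := by
  induction kvs generalizing D with
  | nil => rfl
  | cons kv rest ih =>
    simp only [List.map_cons, List.mem_cons, not_or] at h
    rw [List.foldl_cons, ih _ h.2]
    exact PySem.Dict.getD_insert_of_ne D _ _ h.1

-- B's inner fold performs exactly A's per-entry step on each stored triple (inner keys Nodup)
theorem pvStepB_getD (d : PySem.Dict String (List (String × Int))) (li : String)
    (e : String × List (String × Int)) (hnd : (e.2.map (·.1)).Nodup)
    (D : PySem.Dict String (List String × List Int × List Int)) :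
    (e.2.foldl (pvStepB d e.1) D).getD li ([], [], []) =
      pvRowEntry d li (D.getD li ([], [], [])) e := by
  obtain ⟨period, kvs⟩ := e
  simp only at hnd ⊢
  induction kvs generalizing D with
  | nil => rfl
  | cons kv rest ih =>
    simp only [List.map_cons, List.nodup_cons] at hnd
    by_cases hli : li = kv.1
    · subst hli
      rw [List.foldl_cons, pvStepB_getD_not_mem d period kv.1 rest _ hnd.1]
      unfold pvStepB
      simp only
      rw [PySem.Dict.getD_eq_get?_getD, PySem.Dict.get?_insert_self]
      unfold pvRowEntry
      rw [PySem.Dict.get?_mk_cons]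
      simp only [BEq.rfl, if_true, Option.getD_some, pvPrev_eq]
    · rw [List.foldl_cons, ih _ hnd.2]
      unfold pvStepB pvRowEntry
      simp only
      rw [PySem.Dict.getD_insert_of_ne _ _ _ hli, PySem.Dict.get?_mk_cons]
      have hbe : (kv.1 == li) = false := beq_eq_false_iff_ne.mpr (fun hh => hli hh.symm)
      rw [hbe]
      simp only [Bool.false_eq_true, if_false]

-- B's whole fold, read through getD, is A's entries fold
theorem pvFoldB_getD (d : PySem.Dict String (List (String × Int))) (li : String)
    (l : List (String × List (String × Int))) (hnd : ∀ e ∈ l, (e.2.map (·.1)).Nodup)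
    (D : PySem.Dict String (List String × List Int × List Int)) :
    (l.foldl (fun acc e => e.2.foldl (pvStepB d e.1) acc) D).getD li ([], [], []) =
      l.foldl (pvRowEntry d li) (D.getD li ([], [], [])) := by
  induction l generalizing D with
  | nil => rfl
  | cons e rest ih =>
    rw [List.foldl_cons, List.foldl_cons,
        ih (fun x hx => hnd x (List.mem_cons_of_mem _ hx)),
        pvStepB_getD d li e (hnd e (List.mem_cons_self)) D]

-- B's dict has exactly A's set of line items as keys, in the same (first-appearance) order
theorem pvFoldB_keys (d : PySem.Dict String (List (String × Int)))
    (l : List (String × List (String × Int))) (D : PySem.Dict String (List String × List Int × List Int)) :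
    (l.foldl (fun acc e => e.2.foldl (pvStepB d e.1) acc) D).keys =
      l.foldl (fun s e => PySem.Set.update s (e.2.map (·.1))) D.keys := by
  induction l generalizing D with
  | nil => rfl
  | cons e rest ih =>
    rw [List.foldl_cons, List.foldl_cons, ih]
    congr 1
    exact PySem.Dict.keys_foldl_insert_key (κ := String) e.2 (fun kv => kv.1)
      (fun acc kv => ((acc.getD kv.1 ([],[],[])).1 ++ [e.1], (acc.getD kv.1 ([],[],[])).2.1 ++ [kv.2],
        (acc.getD kv.1 ([],[],[])).2.2 ++ [PySem.Dict.getD (pvPrevDataB d e.1) kv.1 0])) D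

theorem pvFoldB_nodup (d : PySem.Dict String (List (String × Int)))
    (l : List (String × List (String × Int))) (D : PySem.Dict String (List String × List Int × List Int))
    (h : D.keys.Nodup) :
    (l.foldl (fun acc e => e.2.foldl (pvStepB d e.1) acc) D).keys.Nodup := by
  induction l generalizing D with
  | nil => exact h
  | cons e rest ih =>
    rw [List.foldl_cons]
    exact ih _ (PySem.Dict.nodup_keys_foldl_insert_key e.2 (fun kv => kv.1) _ D h)

-- ===== VERDICT (by name: the statement is the Claim_ definition above) =====
theorem preprocess_comparison_data_spec : Claim_equal_preprocess_comparison_data := by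
  intro pt tr _ hpre
  obtain ⟨h1, h2⟩ := hpre
  show preprocess_comparison_data pt tr = preprocess_comparison_data_alt pt tr
  unfold preprocess_comparison_data preprocess_comparison_data_alt
  simp only
  set d := PySem.Dict.mk pt with hd
  set acc := pt.foldl (fun acc e => e.2.foldl (pvStepB d e.1) acc) (PySem.Dict.mk []) with hacc
  have hS : (PySem.Dict.values d).foldl (fun s pd => PySem.Set.update s (pd.map (·.1))) ([] : PySem.Set String)
      = pt.foldl (fun s e => PySem.Set.update s (e.2.map (·.1))) [] := by
    rw [hd, PySem.Dict.values_mk, List.foldl_map]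
  have hkeys : acc.keys = pt.foldl (fun s e => PySem.Set.update s (e.2.map (·.1))) [] := by
    rw [hacc, pvFoldB_keys]; rfl
  have hnodup : acc.keys.Nodup := by
    rw [hacc]; exact pvFoldB_nodup _ _ _ (by simp [PySem.Dict.keys_mk])
  rw [PySem.List.foldl_append_singleton_eq_map, List.nil_append,
      PySem.Dict.items_eq_map_keys acc hnodup ([],[],[]), List.map_map, hS, hkeys]
  apply List.map_congr_left
  intro li _
  have hr : (PySem.Dict.keys d).foldl (pvRowStepA d li) ([], [], [])
      = acc.getD li ([],[],[]) := by
    rw [hd, pvRowA_entries pt li h1, hacc, pvFoldB_getD d li pt h2]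
    rfl
  simp only [Function.comp_apply]
  rw [hr]
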